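-- pv_equiv track=rewrite | github.com/rycj/Protokolar | pokus.py | _round
-- ===== SOURCE A (Python) =====
-- def _round(value):
--     decnum = 0
--     decbool = False
--     roundedvalue = str()
--     for i in value:
--         if i != "." and decbool == False:
--             roundedvalue += i
--             continue
--         elif decbool == False:
--             roundedvalue += i
--             decbool = True
--             continue
--         if decnum < 3:
--             if i == "0" and decnum == 0:
--                 ...
--             else:
--                 decnum += 1
--             roundedvalue += i
--     value = roundedvalue
--     return value
-- ===== SOURCE B (Python) =====
-- def _round(value):
--     head, sep, frac = value.partition(".")
--     if not sep:
--         return value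
--     i = len(frac) - len(frac.lstrip("0"))
--     return head + "." + frac[:i + 3]
-- ===== Notes on version B (the rewrite author's own statement) =====
-- stated objective: simpler
-- what changed: Replaced the char-by-char state machine (decbool/decnum flags with a running string accumulator) by a split on the first dot plus one slice: count the leading zeros of the fractional part and keep frac[:i+3].
import Mathlib
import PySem

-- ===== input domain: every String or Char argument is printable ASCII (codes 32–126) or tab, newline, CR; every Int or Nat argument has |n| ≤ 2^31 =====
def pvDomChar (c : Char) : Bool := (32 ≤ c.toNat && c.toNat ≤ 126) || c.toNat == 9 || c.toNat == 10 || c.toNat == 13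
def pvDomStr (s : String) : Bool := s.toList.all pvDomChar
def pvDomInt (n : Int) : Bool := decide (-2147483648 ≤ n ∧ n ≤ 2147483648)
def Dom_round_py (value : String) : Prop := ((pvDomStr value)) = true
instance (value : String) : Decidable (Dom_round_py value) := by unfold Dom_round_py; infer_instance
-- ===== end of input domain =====

-- B replaces A's char-by-char flag/counter state machine by split-on-first-dot plus one
-- slice (leading zeros + 3 more chars); objective: simpler.

-- ===== PORT A =====
-- literal transliteration of A's for-loop: state (decnum, decbool, roundedvalue)
def roundALoop : List Char → Int → Bool → List Char → List Char
  | [], _, _, acc => acc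
  | i :: rest, decnum, decbool, acc =>
    if i ≠ '.' ∧ decbool = false then
      roundALoop rest decnum decbool (acc ++ [i])
    else if decbool = false then
      roundALoop rest decnum true (acc ++ [i])
    else if decnum < 3 then
      if i = '0' ∧ decnum = 0 then
        roundALoop rest decnum decbool (acc ++ [i])
      else
        roundALoop rest (decnum + 1) decbool (acc ++ [i])
    else
      roundALoop rest decnum decbool acc

def round_py (value : String) : String :=
  String.ofList (roundALoop value.toList 0 false [])

-- ===== PORT B =====
-- hand port of Source B, exact on all strings: value.partition('.') = (takeWhile (≠ '.'), '.', the rest);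
-- len(frac) - len(frac.lstrip('0')) = length of the leading-'0' run of frac; frac[:i+3] = take (i+3)
def round_py_alt (value : String) : String :=
  let cs := value.toList
  let head := cs.takeWhile (fun c => c ≠ '.')
  if head.length = cs.length then value
  else
    let frac := cs.drop (head.length + 1)
    let i := (frac.takeWhile (fun c => c = '0')).length
    String.ofList (head ++ '.' :: frac.take (i + 3))

-- ===== PRECONDITION & SPEC =====
def Spec_round_py (value : String) (out : String) : Prop := out = round_py_alt value
instance (value : String) (out : String) : Decidable (Spec_round_py value out) := by unfold Spec_round_py; infer_instance

-- ===== CLAIM (what is proved, stated in full; the proofs are below) =====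
def Claim_equal_round_py : Prop := ∀ (value : String), Dom_round_py value → Spec_round_py value (round_py value)

-- ===== LEMMAS AND PROOFS =====

-- after the dot, once decnum ≥ 1 the loop just appends the next (3 - n) chars
theorem roundALoop_count (l : List Char) : ∀ (n : Int) (acc : List Char), 1 ≤ n →
    roundALoop l n true acc = acc ++ l.take (3 - n).toNat := by
  induction l with
  | nil => intro n acc _; simp [roundALoop]
  | cons i rest ih =>
    intro n acc hn
    by_cases h3 : n < 3
    · have hne : ¬ (i = '0' ∧ n = 0) := by rintro ⟨_, h⟩; omega
      have ht : (3 - n).toNat = (3 - (n + 1)).toNat + 1 := by omega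
      simp only [roundALoop]
      rw [if_neg (by simp), if_neg (by simp), if_pos h3, if_neg hne,
        ih (n + 1) (acc ++ [i]) (by omega), ht]
      simp
    · have ht : (3 - n).toNat = 0 := by omega
      simp only [roundALoop]
      rw [if_neg (by simp), if_neg (by simp), if_neg h3, ih n acc hn, ht]
      simp

-- after the dot with decnum = 0: keep the leading-zero run, then the next 3 chars
theorem roundALoop_zero (l : List Char) : ∀ (acc : List Char),
    roundALoop l 0 true acc =
      acc ++ l.takeWhile (fun c => c = '0')
          ++ (l.drop (l.takeWhile (fun c => c = '0')).length).take 3 := by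
  induction l with
  | nil => intro acc; simp [roundALoop]
  | cons i rest ih =>
    intro acc
    by_cases h0 : i = '0'
    · subst h0
      simp only [roundALoop]
      rw [if_neg (by simp), if_neg (by simp), if_pos (by norm_num), if_pos (by simp), ih]
      simp
    · simp only [roundALoop]
      rw [if_neg (by simp), if_neg (by simp), if_pos (by norm_num), if_neg (by simp [h0]),
        roundALoop_count rest (0+1) (acc ++ [i]) (by norm_num)]
      have ht : ((3 : Int) - (0+1)).toNat = 2 := by decide
      rw [ht]
      simp [h0, List.take_succ_cons]

-- frac.take (i+3) splits as the zero run ++ the next 3 chars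
theorem take_run_add (l : List Char) :
    l.take ((l.takeWhile (fun c => c = '0')).length + 3) =
      l.takeWhile (fun c => c = '0')
        ++ (l.drop (l.takeWhile (fun c => c = '0')).length).take 3 := by
  rw [List.take_add]
  congr 1
  exact (List.prefix_iff_eq_take.mp (List.takeWhile_prefix _)).symm

-- main list-level lemma: the loop from its initial state, with an arbitrary accumulator
theorem roundALoop_main (cs : List Char) : ∀ (acc : List Char),
    roundALoop cs 0 false acc =
      (if (cs.takeWhile (fun c => c ≠ '.')).length = cs.length then acc ++ cs
       else acc ++ (cs.takeWhile (fun c => c ≠ '.'))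
            ++ '.' :: ((cs.drop ((cs.takeWhile (fun c => c ≠ '.')).length + 1)).take
                (((cs.drop ((cs.takeWhile (fun c => c ≠ '.')).length + 1)).takeWhile
                    (fun c => c = '0')).length + 3))) := by
  induction cs with
  | nil => intro acc; simp [roundALoop]
  | cons i rest ih =>
    intro acc
    by_cases hd : i = '.'
    · subst hd
      have h1 : roundALoop ('.' :: rest) 0 false acc = roundALoop rest 0 true (acc ++ ['.']) := by
        simp only [roundALoop]
        rw [if_neg (by simp), if_pos (by trivial)]
      rw [h1, roundALoop_zero]
      have ht : (('.' :: rest).takeWhile (fun c => c ≠ '.')) = [] := by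
        simp
      rw [ht]
      rw [if_neg (by simp)]
      simp [take_run_add]
    · have h1 : roundALoop (i :: rest) 0 false acc = roundALoop rest 0 false (acc ++ [i]) := by
        simp only [roundALoop]
        rw [if_pos ⟨hd, by trivial⟩]
      have ht : ((i :: rest).takeWhile (fun c => c ≠ '.')) =
          i :: rest.takeWhile (fun c => c ≠ '.') := by
        simp [hd]
      rw [h1, ih, ht]
      by_cases hlen : (rest.takeWhile (fun c => c ≠ '.')).length = rest.length
      · rw [if_pos hlen, if_pos (by rw [List.length_cons, List.length_cons, hlen])]
        simp
      · rw [if_neg hlen, if_neg (by simp only [List.length_cons]; omega)]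
        simp

-- ===== VERDICT (by name: the statement is the Claim_ definition above) =====
theorem round_py_spec : Claim_equal_round_py := by
  intro value _
  unfold Spec_round_py round_py round_py_alt
  rw [roundALoop_main value.toList []]
  by_cases h : (value.toList.takeWhile (fun c => c ≠ '.')).length = value.toList.length
  · rw [if_pos h, if_pos h]
    simp
  · rw [if_neg h, if_neg h]
    simp
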